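-- pv_equiv track=rewrite | github.com/MichaelSquires/AdventOfCode | 2017/d17.py | part1
-- ===== SOURCE A (Python) =====
-- import collections
--
-- def part1(steps):
--     spins = 2017
--     buf = collections.deque([0])
--     curpos = 0
--
--     adj = 0
--     for i in range(1,spins+1):
--         index = (curpos + steps) % i
--         buf.insert(index, i)
--         curpos = index + 1
--
--     n = buf.index(2017)
--
--     return buf[n+1]
-- ===== SOURCE B (Python) =====
-- import collections
--
-- def part1(steps):
--     d = collections.deque([0])
--     for i in range(1, 2018):
--         d.rotate(-steps)
--         d.append(i)
--     return d[0]
-- ===== Notes on version B (the rewrite author's own statement) =====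
-- stated objective: idiomatic
-- what changed: B replaces A's absolute-index bookkeeping (curpos variable, (curpos+steps)%i insert position, final buf.index(2017) scan and buf[n+1] lookup) by a rotating deque that always keeps the current position at the front: rotate(-steps) then append, and the answer is simply d[0].
import Mathlib
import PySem

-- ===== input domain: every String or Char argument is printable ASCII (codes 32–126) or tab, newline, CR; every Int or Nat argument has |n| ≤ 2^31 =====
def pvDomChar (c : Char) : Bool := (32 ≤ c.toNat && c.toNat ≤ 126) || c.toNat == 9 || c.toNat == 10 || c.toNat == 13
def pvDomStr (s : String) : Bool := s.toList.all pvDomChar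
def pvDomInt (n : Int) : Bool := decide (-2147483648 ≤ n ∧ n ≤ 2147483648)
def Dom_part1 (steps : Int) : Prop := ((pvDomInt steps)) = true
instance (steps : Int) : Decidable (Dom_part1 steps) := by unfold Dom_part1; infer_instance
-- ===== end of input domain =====

-- B replaces A's absolute-index bookkeeping (curpos, (curpos+steps)%i, final buf.index scan)
-- by keeping the current position at the front of a rotating deque; return value only.

-- ===== PORT A =====
-- the for-loop over range(1, 2018): state (buf, curpos); iteration m+1 handles i = m+1
def part1Loop (steps : Int) : Nat → List Int × Int
  | 0 => ([0], 0)
  | m + 1 =>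
    let s := part1Loop steps m
    let i : Int := (m : Int) + 1
    let index := PySem.Int.mod (s.2 + steps) i
    (PySem.List.insert s.1 index i, index + 1)

def part1 (steps : Int) : Int :=
  let buf := (part1Loop steps 2017).1
  match PySem.List.index? buf 2017 with
  | some n => (PySem.List.pyGet? buf ((n : Int) + 1)).getD 0
      -- the .getD 0 defaults are unreachable: 2017 is in buf and is never its last element
  | none => 0

-- ===== PORT B =====
-- d.rotate(-steps) on a nonempty deque of length L moves the first (steps % L) elements
-- to the back (exact deque semantics for L > 0); then d.append(i)
def part1AltLoop (steps : Int) : Nat → List Int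
  | 0 => [0]
  | m + 1 =>
    let d := part1AltLoop steps m
    let k := (PySem.Int.mod steps ((m : Int) + 1)).toNat
    (d.drop k ++ d.take k) ++ [(m : Int) + 1]

def part1_alt (steps : Int) : Int :=
  (part1AltLoop steps 2017).headD 0   -- d[0]; the deque is never empty

-- ===== PRECONDITION & SPEC =====
def Spec_part1 (steps : Int) (out : Int) : Prop := out = part1_alt steps
instance (steps : Int) (out : Int) : Decidable (Spec_part1 steps out) := by unfold Spec_part1; infer_instance

-- ===== CLAIM (what is proved, stated in full; the proofs are below) =====
def Claim_equal_part1 : Prop := ∀ (steps : Int), Dom_part1 steps → Spec_part1 steps (part1 steps)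

-- ===== LEMMAS AND PROOFS =====

theorem index?_append_cons_self (pre suf : List Int) (v : Int) (h : v ∉ pre) :
    PySem.List.index? (pre ++ v :: suf) v = some pre.length := by
  induction pre with
  | nil => exact PySem.List.index?_cons_self v suf
  | cons x xs ih =>
    have hx : x ≠ v := fun he => h (by simp [he])
    rw [List.cons_append, PySem.List.index?_cons_of_ne (xs ++ v :: suf) hx,
      ih (fun hm => h (List.mem_cons_of_mem _ hm))]
    rfl

theorem part1_invariant (steps : Int) (m : Nat) :
    (part1Loop steps m).1.length = m + 1 ∧
    0 ≤ (part1Loop steps m).2 ∧ (part1Loop steps m).2.toNat ≤ m ∧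
    (∀ x ∈ (part1Loop steps m).1, x ≤ (m : Int)) ∧
    part1AltLoop steps m = (part1Loop steps m).1.rotate (part1Loop steps m).2.toNat := by
  induction m with
  | zero => simp [part1Loop, part1AltLoop, List.rotate]
  | succ m ih =>
    obtain ⟨hlen, hc0, hcle, hbnd, hrot⟩ := ih
    set buf := (part1Loop steps m).1 with hbuf
    set c := (part1Loop steps m).2 with hcdef
    have hL : (0 : Int) < (m : Int) + 1 := by positivity
    have hLne : ((m : Int) + 1) ≠ 0 := by omega
    set idx := PySem.Int.mod (c + steps) ((m : Int) + 1) with hidx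
    have hmod : idx = (c + steps) % ((m : Int) + 1) :=
      PySem.Int.mod_eq_emod_of_pos hL
    have hidx0 : 0 ≤ idx := by rw [hmod]; exact Int.emod_nonneg _ hLne
    have hidxlt : idx < (m : Int) + 1 := by rw [hmod]; exact Int.emod_lt_of_pos _ hL
    have hidxN : idx = ((idx.toNat : Nat) : Int) := (Int.toNat_of_nonneg hidx0).symm
    have hidxNle : idx.toNat ≤ buf.length := by omega
    have hins : PySem.List.insert buf idx ((m : Int) + 1)
        = buf.take idx.toNat ++ ((m : Int) + 1) :: buf.drop idx.toNat := by
      rw [hidxN]; exact PySem.List.insert_natCast _ _ _ hidxNle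
    have hstepA : part1Loop steps (m + 1)
        = (buf.take idx.toNat ++ ((m : Int) + 1) :: buf.drop idx.toNat, idx + 1) := by
      show (PySem.List.insert buf idx ((m : Int) + 1), idx + 1) = _
      rw [hins]
    rw [hstepA]
    refine ⟨?_, by omega, by omega, ?_, ?_⟩
    · simp; omega
    · intro x hx
      rcases List.mem_append.mp hx with h1 | h1
      · exact le_trans (hbnd x (List.mem_of_mem_take h1)) (by omega)
      · rcases List.mem_cons.mp h1 with h2 | h2
        · omega
        · exact le_trans (hbnd x (List.mem_of_mem_drop h2)) (by omega)
    · -- the rotation invariant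
      set k := PySem.Int.mod steps ((m : Int) + 1) with hk
      have hkmod : k = steps % ((m : Int) + 1) := PySem.Int.mod_eq_emod_of_pos hL
      have hk0 : 0 ≤ k := by rw [hkmod]; exact Int.emod_nonneg _ hLne
      have hklt : k < (m : Int) + 1 := by rw [hkmod]; exact Int.emod_lt_of_pos _ hL
      show (part1AltLoop steps m).drop k.toNat ++ (part1AltLoop steps m).take k.toNat
            ++ [(m : Int) + 1] = _
      rw [hrot]
      have hlenrot : (buf.rotate c.toNat).length = m + 1 := by
        rw [List.length_rotate, hlen]
      have hkle : k.toNat ≤ (buf.rotate c.toNat).length := by omega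
      have hdt : (buf.rotate c.toNat).drop k.toNat ++ (buf.rotate c.toNat).take k.toNat
          = (buf.rotate c.toNat).rotate k.toNat :=
        (List.rotate_eq_drop_append_take hkle).symm
      rw [hdt, List.rotate_rotate]
      -- (c.toNat + k.toNat) ≡ idx.toNat  [mod m+1]
      have hmodeq : (c.toNat + k.toNat) % buf.length = idx.toNat % buf.length := by
        have hcast : (((c.toNat + k.toNat) % buf.length : Nat) : Int)
            = ((idx.toNat % buf.length : Nat) : Int) := by
          push_cast [Int.toNat_of_nonneg hc0, Int.toNat_of_nonneg hk0,
            Int.toNat_of_nonneg hidx0, hlen]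
          rw [hmod, hkmod, Int.add_emod c (steps % _), Int.emod_emod_of_dvd _ dvd_rfl,
            ← Int.add_emod, Int.emod_emod_of_dvd _ dvd_rfl]
        exact_mod_cast hcast
      have hrr : buf.rotate (c.toNat + k.toNat) = buf.rotate idx.toNat := by
        rw [← List.rotate_mod buf (c.toNat + k.toNat), hmodeq, List.rotate_mod]
      rw [hrr]
      -- both sides are drop idx ++ take idx ++ [m+1]
      have hleft : buf.rotate idx.toNat = buf.drop idx.toNat ++ buf.take idx.toNat :=
        List.rotate_eq_drop_append_take hidxNle
      have htlen : (buf.take idx.toNat ++ [(m : Int) + 1]).length = idx.toNat + 1 := by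
        simp [List.length_take, hlen]; omega
      have hright : (buf.take idx.toNat ++ ((m : Int) + 1) :: buf.drop idx.toNat).rotate
            (idx + 1).toNat
          = buf.drop idx.toNat ++ (buf.take idx.toNat ++ [(m : Int) + 1]) := by
        have he : buf.take idx.toNat ++ ((m : Int) + 1) :: buf.drop idx.toNat
            = (buf.take idx.toNat ++ [(m : Int) + 1]) ++ buf.drop idx.toNat := by simp
        have hlen2 : ((buf.take idx.toNat ++ [(m : Int) + 1]) ++ buf.drop idx.toNat).length
            = m + 2 := by simp [hlen]
        have hle2 : (idx + 1).toNat ≤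
            ((buf.take idx.toNat ++ [(m : Int) + 1]) ++ buf.drop idx.toNat).length := by
          rw [hlen2]; omega
        rw [he, List.rotate_eq_drop_append_take hle2]
        have htn : (idx + 1).toNat = (buf.take idx.toNat ++ [(m : Int) + 1]).length := by
          rw [htlen]; omega
        rw [htn, List.drop_left, List.take_left]
      rw [hleft, hright, List.append_assoc]

theorem final_general (steps : Int) (m : Nat) :
    (match PySem.List.index? (part1Loop steps (m + 1)).1 ((m : Int) + 1) with
     | some n => (PySem.List.pyGet? (part1Loop steps (m + 1)).1 ((n : Int) + 1)).getD 0
     | none => 0) = (part1AltLoop steps (m + 1)).headD 0 := by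
  obtain ⟨hlen, hc0, hcle, hbnd, hrot⟩ := part1_invariant steps m
  set buf := (part1Loop steps m).1 with hbuf
  set c := (part1Loop steps m).2 with hcdef
  have hL : (0 : Int) < (m : Int) + 1 := by positivity
  have hLne : ((m : Int) + 1) ≠ 0 := by omega
  set idx := PySem.Int.mod (c + steps) ((m : Int) + 1) with hidx
  have hmod : idx = (c + steps) % ((m : Int) + 1) := PySem.Int.mod_eq_emod_of_pos hL
  have hidx0 : 0 ≤ idx := by rw [hmod]; exact Int.emod_nonneg _ hLne
  have hidxlt : idx < (m : Int) + 1 := by rw [hmod]; exact Int.emod_lt_of_pos _ hL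
  have hidxNle : idx.toNat ≤ buf.length := by omega
  have hins : PySem.List.insert buf idx ((m : Int) + 1)
      = buf.take idx.toNat ++ ((m : Int) + 1) :: buf.drop idx.toNat := by
    rw [(Int.toNat_of_nonneg hidx0).symm]
    exact PySem.List.insert_natCast _ _ _ hidxNle
  have hstep : part1Loop steps (m + 1)
      = (buf.take idx.toNat ++ ((m : Int) + 1) :: buf.drop idx.toNat, idx + 1) := by
    show (PySem.List.insert buf idx ((m : Int) + 1), idx + 1) = _
    rw [hins]
  have hnot : ((m : Int) + 1) ∉ buf.take idx.toNat := fun hmem =>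
    absurd (hbnd _ (List.mem_of_mem_take hmem)) (by omega)
  have hdropne : buf.drop idx.toNat ≠ [] := by
    intro he
    have := congrArg List.length he
    simp [hlen] at this; omega
  obtain ⟨y, ys, hys⟩ := List.exists_cons_of_ne_nil hdropne
  have htklen : (buf.take idx.toNat).length = idx.toNat := by
    rw [List.length_take]; omega
  -- A side
  have hA : (match PySem.List.index? (part1Loop steps (m + 1)).1 ((m : Int) + 1) with
     | some n => (PySem.List.pyGet? (part1Loop steps (m + 1)).1 ((n : Int) + 1)).getD 0
     | none => 0) = y := by
    rw [hstep]
    simp only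
    rw [index?_append_cons_self _ _ _ hnot]
    show (PySem.List.pyGet? (buf.take idx.toNat ++ ((m : Int) + 1) :: buf.drop idx.toNat)
      (((buf.take idx.toNat).length : Int) + 1)).getD 0 = y
    have hre : buf.take idx.toNat ++ ((m : Int) + 1) :: buf.drop idx.toNat
        = (buf.take idx.toNat ++ [(m : Int) + 1]) ++ y :: ys := by simp [hys]
    have hlen2 : ((buf.take idx.toNat ++ [(m : Int) + 1]).length : Int)
        = ((buf.take idx.toNat).length : Int) + 1 := by simp
    rw [hre, ← hlen2, PySem.List.pyGet?_append_length]
    rfl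
  -- B side
  have hB : (part1AltLoop steps (m + 1)).headD 0 = y := by
    have halt : part1AltLoop steps (m + 1)
        = ((part1AltLoop steps m).drop (PySem.Int.mod steps ((m : Int) + 1)).toNat
          ++ (part1AltLoop steps m).take (PySem.Int.mod steps ((m : Int) + 1)).toNat)
          ++ [(m : Int) + 1] := rfl
    rw [halt, hrot]
    set k := PySem.Int.mod steps ((m : Int) + 1) with hk
    have hkmod : k = steps % ((m : Int) + 1) := PySem.Int.mod_eq_emod_of_pos hL
    have hk0 : 0 ≤ k := by rw [hkmod]; exact Int.emod_nonneg _ hLne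
    have hklt : k < (m : Int) + 1 := by rw [hkmod]; exact Int.emod_lt_of_pos _ hL
    have hkle : k.toNat ≤ (buf.rotate c.toNat).length := by
      rw [List.length_rotate, hlen]; omega
    rw [← List.rotate_eq_drop_append_take hkle, List.rotate_rotate]
    have hmodeq : (c.toNat + k.toNat) % buf.length = idx.toNat % buf.length := by
      have hcast : (((c.toNat + k.toNat) % buf.length : Nat) : Int)
          = ((idx.toNat % buf.length : Nat) : Int) := by
        push_cast [Int.toNat_of_nonneg hc0, Int.toNat_of_nonneg hk0,
          Int.toNat_of_nonneg hidx0, hlen]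
        rw [hmod, hkmod, Int.add_emod c (steps % _), Int.emod_emod_of_dvd _ dvd_rfl,
          ← Int.add_emod, Int.emod_emod_of_dvd _ dvd_rfl]
      exact_mod_cast hcast
    have hrr : buf.rotate (c.toNat + k.toNat) = buf.rotate idx.toNat := by
      rw [← List.rotate_mod buf (c.toNat + k.toNat), hmodeq, List.rotate_mod]
    rw [hrr, List.rotate_eq_drop_append_take hidxNle, hys]
    rfl
  rw [hA, hB]

-- ===== VERDICT (by name: the statement is the Claim_ definition above) =====
theorem part1_spec : Claim_equal_part1 := by
  intro steps _
  show part1 steps = part1_alt steps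
  have h := final_general steps 2016
  have e1 : (2016 : Nat) + 1 = 2017 := rfl
  have e2 : ((2016 : Nat) : Int) + 1 = 2017 := by norm_num
  rw [e1, e2] at h
  unfold part1 part1_alt
  exact h
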